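-- pv_equiv track=rewrite | github.com/antariandel/kyanit | src/kyanit/colorid.py | from_number
-- ===== SOURCE A (Python) =====
-- _valid_id_colors = {
--     "B": (0, 0, 255),
--     "C": (0, 128, 128),
--     "G": (0, 128, 0),  # brightness compensated
--     "M": (128, 0, 128),
--     "R": (128, 0, 0),  # brightness compensated
--     "W": (85, 85, 85),
--     "Y": (128, 128, 0),
-- }
--
-- def from_number(num):
--     """
--     Calculate a Color ID string from a number passed to `num`. If `num` is negative or
--     larger than 342, `ValueError` will be raised. The Color ID is used for representing
--     the last octet of an IP address, so any value above 245 is probably also not valid,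
--     but 342 is the maximum number that can be represented with the 7 available color
--     symbols.
--
--     If `num` is not `int`, `TypeError` will be raised.
--     """
--
--     max_addr = len(_valid_id_colors) ** 3 - 1
--
--     if num < 0 or num > max_addr:
--         raise ValueError
--
--     base = len(_valid_id_colors)
--     symbols = [key for key in _valid_id_colors]
--     symbols.sort()
--
--     digits = []
--
--     while num:
--         digits.append(symbols[int(num % base)])
--         num = int(num / base)
--
--     digits.reverse()
--
--     result = "".join(digits)
--
--     return (symbols[0] * (3 - len(result))) + result  # pad
-- ===== SOURCE B (Python) =====
-- def from_number(num):
--     if num < 0 or num > 342: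
--         raise ValueError
--     s = "BCGMRWY"
--     return s[num // 49] + s[(num // 7) % 7] + s[num % 7]
-- ===== Notes on version B (the rewrite author's own statement) =====
-- stated objective: simpler
-- what changed: Replaces the while-loop building digits, the reverse and the explicit padding step with a closed-form extraction of the three base-7 digits and direct indexing into the sorted symbol string.
import Mathlib
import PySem

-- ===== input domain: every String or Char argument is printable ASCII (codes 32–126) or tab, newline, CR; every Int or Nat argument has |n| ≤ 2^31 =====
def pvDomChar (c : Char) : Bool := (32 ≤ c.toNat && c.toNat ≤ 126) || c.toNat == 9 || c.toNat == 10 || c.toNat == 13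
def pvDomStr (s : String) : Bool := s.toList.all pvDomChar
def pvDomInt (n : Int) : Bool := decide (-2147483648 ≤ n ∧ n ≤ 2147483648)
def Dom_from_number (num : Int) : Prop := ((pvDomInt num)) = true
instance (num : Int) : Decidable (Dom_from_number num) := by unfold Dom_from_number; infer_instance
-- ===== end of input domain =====

-- B replaces A's digit-collecting while-loop, reverse and padding with a closed-form
-- computation of the three base-7 digits (same guard, same return values; objective: simpler).

-- ===== PORT A =====
-- A's while loop: `while num: digits.append(symbols[int(num % base)]); num = int(num / base)`.
-- `int(num / 7)` truncates toward zero for Python ints, i.e. Int.tdiv; `num % 7` is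
-- Python's floor mod, PySem.Int.mod. Indexing is always in range (0 ≤ mod < 7).
-- fuel = num.natAbs + 1 only makes the loop total (|int(num/7)| < |num| for num ≠ 0);
-- it never cuts the loop short.
def fromNumberLoop (fuel : Nat) (num : Int) (symbols : List String) (digits : List String) : List String :=
  match fuel with
  | 0 => digits
  | fuel + 1 =>
    if num = 0 then digits
    else
      fromNumberLoop fuel (num.tdiv 7) symbols
        (digits ++ [(PySem.List.pyGet? symbols (PySem.Int.mod num 7)).getD ""])

def from_number (num : Int) : String :=
  -- max_addr = 7^3 - 1 = 342; num < 0 or num > 342 raises ValueError (excluded by Pre_)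
  let symbols := PySem.List.sorted ["B", "C", "G", "M", "R", "W", "Y"] (fun x => x) false
  let digits := fromNumberLoop (num.natAbs + 1) num symbols []
  let digits := digits.reverse
  let result := String.join digits
  String.join (List.replicate (3 - result.toList.length) ((PySem.List.pyGet? symbols (0:Int)).getD "")) ++ result

-- ===== PORT B =====
def from_number_alt (num : Int) : String :=
  -- same ValueError guard as A (excluded by Pre_)
  let s := "BCGMRWY"
  String.singleton ((PySem.Str.pyGet? s (PySem.Int.floordiv num 49)).getD ' ')
    ++ String.singleton ((PySem.Str.pyGet? s (PySem.Int.mod (PySem.Int.floordiv num 7) 7)).getD ' ')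
    ++ String.singleton ((PySem.Str.pyGet? s (PySem.Int.mod num 7)).getD ' ')

-- ===== PRECONDITION & SPEC =====
-- Exactly the inputs where A returns (num < 0 or num > 342 raises ValueError).
def Pre_from_number (num : Int) : Prop := 0 ≤ num ∧ num ≤ 342
instance (num : Int) : Decidable (Pre_from_number num) := by unfold Pre_from_number; infer_instance
def pvWitness_from_number : Int := (17)

def Spec_from_number (num : Int) (out : String) : Prop := out = from_number_alt num
instance (num : Int) (out : String) : Decidable (Spec_from_number num out) := by unfold Spec_from_number; infer_instance

-- ===== CLAIM (what is proved, stated in full; the proofs are below) =====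
def Claim_equal_from_number : Prop := ∀ (num : Int), Dom_from_number num → Pre_from_number num → Spec_from_number num (from_number num)

-- ===== LEMMAS AND PROOFS =====
lemma sortedSymbols :
    PySem.List.sorted ["B", "C", "G", "M", "R", "W", "Y"] (fun x => x) false
      = ["B", "C", "G", "M", "R", "W", "Y"] := by
  apply PySem.List.sorted_eq_self_of_pairwise
  simp [List.pairwise_cons]
  refine ⟨⟨?_,?_,?_,?_,?_,?_⟩,⟨?_,?_,?_,?_,?_⟩,⟨?_,?_,?_,?_⟩,⟨?_,?_,?_⟩,⟨?_,?_⟩,?_⟩ <;> decide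

-- from_number with the sorted symbol list replaced by its literal value (proof helper only)
def fromNumberLit (num : Int) : String :=
  let symbols := ["B", "C", "G", "M", "R", "W", "Y"]
  let digits := fromNumberLoop (num.natAbs + 1) num symbols []
  let digits := digits.reverse
  let result := String.join digits
  String.join (List.replicate (3 - result.toList.length) ((PySem.List.pyGet? symbols (0:Int)).getD "")) ++ result

lemma from_number_eq_lit (num : Int) : from_number num = fromNumberLit num := by
  unfold from_number fromNumberLit
  rw [sortedSymbols]

set_option maxRecDepth 4000 in
lemma from_number_all_small :
    (List.range 343).all (fun n => fromNumberLit (Int.ofNat n) = from_number_alt (Int.ofNat n)) = true := by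
  decide

-- ===== VERDICT (by name: the statement is the Claim_ definition above) =====
theorem from_number_spec : Claim_equal_from_number := by
  intro num _ hpre
  obtain ⟨h0, h342⟩ := hpre
  have hn : num = Int.ofNat num.toNat := (Int.toNat_of_nonneg h0).symm
  have hlt : num.toNat < 343 := by omega
  have hm := List.all_eq_true.mp from_number_all_small (num.toNat)
    (by simpa using List.mem_range.mpr hlt)
  unfold Spec_from_number
  rw [hn, from_number_eq_lit]
  exact of_decide_eq_true hm
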